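-- pv_equiv track=rewrite | github.com/maksverver/codecup-box | tools/coding.py | IdToTile
-- ===== SOURCE A (Python) =====
-- def IdToTile(id):
--     '''Inverse of TileToId().'''
--     assert id >= 0
--
--     indices = []
--     for i in range(6):
--         indices.append(id % (i + 1))
--         id //= (i + 1)
--     assert id == 0
--     indices.reverse()
--
--     tile = []
--     values = [1, 2, 3, 4, 5, 6]
--     for i in indices:
--         tile.append(values[i])
--         del values[i]
--     return tuple(tile)
-- ===== SOURCE B (Python) =====
-- import itertools
--
-- def IdToTile(id):
--     assert 0 <= id < 720
--     return list(itertools.permutations((1, 2, 3, 4, 5, 6)))[id]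
-- ===== Notes on version B (the rewrite author's own statement) =====
-- stated objective: idiomatic
-- what changed: Replaces the hand-rolled factorial-number-system decode (mod/div loop plus selection-with-deletion) by direct indexing into itertools.permutations' lexicographic enumeration of (1..6).
import Mathlib
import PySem

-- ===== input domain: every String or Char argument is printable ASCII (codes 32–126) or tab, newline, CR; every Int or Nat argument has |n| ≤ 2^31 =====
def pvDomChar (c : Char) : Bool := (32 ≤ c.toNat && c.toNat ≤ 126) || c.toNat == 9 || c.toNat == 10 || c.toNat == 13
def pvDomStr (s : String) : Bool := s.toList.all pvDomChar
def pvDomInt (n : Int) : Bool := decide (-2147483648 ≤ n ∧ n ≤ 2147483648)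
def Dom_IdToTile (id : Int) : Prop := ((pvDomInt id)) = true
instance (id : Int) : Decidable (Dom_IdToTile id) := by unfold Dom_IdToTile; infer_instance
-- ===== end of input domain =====

-- B replaces the factorial-number-system decode by direct indexing into the
-- lexicographic enumeration of all permutations of (1..6) (idiomatic, not faster).


-- ===== PORT A =====
-- the `for i in range(6)` loop: state is (indices, id)
def IdToTileLoop1 (st : List Int × Int) (i : Int) : List Int × Int :=
  (st.1 ++ [PySem.Int.mod st.2 (i + 1)], PySem.Int.floordiv st.2 (i + 1))

-- the second loop: state is (tile, values); values[i] / del values[i]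
def IdToTileLoop2 (st : List Int × List Int) (i : Int) : List Int × List Int :=
  match PySem.List.pop? st.2 i with      -- values[i] followed by del values[i]
  | none => st                           -- IndexError (unreachable for 0 ≤ id < 720)
  | some (v, rest) => (st.1 ++ [v], rest)

def IdToTile (id : Int) : List Int :=
  let st := (PySem.List.pyRange 0 6 1).foldl IdToTileLoop1 ([], id)
  let indices := st.1.reverse
  (indices.foldl IdToTileLoop2 ([], [1, 2, 3, 4, 5, 6])).1

-- ===== PORT B =====
-- itertools.permutations on a sorted duplicate-free tuple yields all permutations in
-- lexicographic order; ported by hand (exact for this input): each element in turn is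
-- placed first, followed by the permutations of the remaining elements.
def lexPerms (fuel : Nat) (l : List Int) : List (List Int) :=
  match fuel with
  | 0 => [[]]
  | fuel + 1 =>
    if l = [] then [[]]
    else l.flatMap (fun x => (lexPerms fuel (l.erase x)).map (x :: ·))

def IdToTile_alt (id : Int) : List Int :=
  ((PySem.List.pyGet? (lexPerms 6 [1, 2, 3, 4, 5, 6]) id).getD [])

-- ===== PRECONDITION & SPEC =====
-- A's asserts (id >= 0 and the final id == 0) raise AssertionError outside 0..719; B's assert too.
def Pre_IdToTile (id : Int) : Prop := 0 ≤ id ∧ id < 720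
instance (id : Int) : Decidable (Pre_IdToTile id) := by unfold Pre_IdToTile; infer_instance
def pvWitness_IdToTile : Int := (5)
def Spec_IdToTile (id : Int) (out : List Int) : Prop := out = IdToTile_alt id
instance (id : Int) (out : List Int) : Decidable (Spec_IdToTile id out) := by unfold Spec_IdToTile; infer_instance

-- ===== CLAIM =====
def Claim_equal_IdToTile : Prop := ∀ (id : Int), Dom_IdToTile id → Pre_IdToTile id → Spec_IdToTile id (IdToTile id)

-- ===== LEMMAS AND PROOFS =====
set_option maxRecDepth 100000 in
set_option maxHeartbeats 4000000 in
theorem idToTile_eq_fin : ∀ n : Fin 720, IdToTile (n : Int) = IdToTile_alt (n : Int) := by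
  decide

-- ===== VERDICT =====
theorem IdToTile_spec : Claim_equal_IdToTile := by
  intro id _ hpre
  unfold Spec_IdToTile
  obtain ⟨h0, h720⟩ := hpre
  have hn : id.toNat < 720 := by omega
  have := idToTile_eq_fin ⟨id.toNat, hn⟩
  simpa [Int.toNat_of_nonneg h0] using this
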